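-- pv_equiv track=rewrite | github.com/thetwit4u/nike-cch-workflow-orchestrator | workflow-orchestrator/src/app.py | convert_aws_trace_header_to_parent_trace
-- ===== SOURCE A (Python) =====
-- def convert_aws_trace_header_to_parent_trace(aws_trace_header: str) -> str:
--     parts = aws_trace_header.split(";")
--     root, parent, sampled = "", "", ""
--     for part in parts:
--         if part.startswith("Root="):
--             root = part[5:]
--         elif part.startswith("Parent="):
--             parent = part[7:]
--         elif part.startswith("Sampled="):
--             sampled = part[8:]
--
--     root_parts = root.split("-")
--     trace_id = root_parts[1] + root_parts[2] if len(root_parts) > 2 else ""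
--
--     span_id = parent
--
--     flags = "00"
--     if sampled == "1":
--         flags = "01"
--     return f"00-{trace_id}-{span_id}-{flags}"
-- ===== SOURCE B (Python) =====
-- def convert_aws_trace_header_to_parent_trace(aws_trace_header: str) -> str:
--     parts = aws_trace_header.split(";")
--
--     def last_field(prefix: str) -> str:
--         # first match scanning from the right == last match in A's forward loop
--         for p in reversed(parts):
--             if p.startswith(prefix):
--                 return p[len(prefix):]
--         return ""
--
--     root = last_field("Root=")
--     span_id = last_field("Parent=")
--     sampled = last_field("Sampled=")
--
--     root_parts = root.split("-")
--     trace_id = root_parts[1] + root_parts[2] if len(root_parts) > 2 else ""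
--     flags = "01" if sampled == "1" else "00"
--     return f"00-{trace_id}-{span_id}-{flags}"
-- ===== Notes on version B (the rewrite author's own statement) =====
-- stated objective: alternative
-- what changed: Replaces A's single forward loop carrying three accumulators (last prefix match wins) with three independent right-to-left searches that each return the first matching field and stop early.
import Mathlib
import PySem

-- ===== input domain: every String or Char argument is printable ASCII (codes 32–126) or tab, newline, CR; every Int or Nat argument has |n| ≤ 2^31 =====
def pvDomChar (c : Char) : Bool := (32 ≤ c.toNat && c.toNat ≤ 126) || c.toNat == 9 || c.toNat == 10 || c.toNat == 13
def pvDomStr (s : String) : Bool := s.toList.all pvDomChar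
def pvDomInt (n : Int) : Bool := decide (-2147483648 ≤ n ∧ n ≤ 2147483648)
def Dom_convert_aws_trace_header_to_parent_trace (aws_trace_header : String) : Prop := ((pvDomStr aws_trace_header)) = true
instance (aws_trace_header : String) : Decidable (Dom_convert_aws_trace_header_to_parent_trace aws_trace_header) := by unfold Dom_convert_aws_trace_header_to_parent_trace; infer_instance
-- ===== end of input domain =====

-- B replaces A's single forward loop carrying three accumulators (last match wins) with three
-- independent right-to-left first-match searches; objective: alternative (same cost, different traversal).

-- ===== PORT A =====
-- A's loop body (the if/elif chain over one ';'-part, updating the (root, parent, sampled) state)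
def stepA (acc : String × String × String) (part : String) : String × String × String :=
  if PySem.Str.startswith part "Root=" then (PySem.Str.slice part (some 5) none, acc.2.1, acc.2.2)
  else if PySem.Str.startswith part "Parent=" then (acc.1, PySem.Str.slice part (some 7) none, acc.2.2)
  else if PySem.Str.startswith part "Sampled=" then (acc.1, acc.2.1, PySem.Str.slice part (some 8) none)
  else acc

def convert_aws_trace_header_to_parent_trace (aws_trace_header : String) : String :=
  let parts := (PySem.Str.split? aws_trace_header ";").getD []
  let st := parts.foldl stepA ("", "", "")
  let root := st.1
  let parent := st.2.1
  let sampled := st.2.2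
  let root_parts := (PySem.Str.split? root "-").getD []
  let trace_id := if root_parts.length > 2 then
      ((PySem.List.pyGet? root_parts 1).getD "") ++ ((PySem.List.pyGet? root_parts 2).getD "")
    else ""
  let span_id := parent
  let flags := if sampled = "1" then "01" else "00"
  "00-" ++ trace_id ++ "-" ++ span_id ++ "-" ++ flags

-- ===== PORT B =====
-- B's helper: scan the parts from the right, return the first field matching the prefix
def lastFieldB (parts : List String) (pre : String) : String :=
  match parts.reverse.find? (fun p => PySem.Str.startswith p pre) with
  | some p => PySem.Str.slice p (some ((PySem.Str.len pre : Int))) none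
  | none => ""

def convert_aws_trace_header_to_parent_trace_alt (aws_trace_header : String) : String :=
  let parts := (PySem.Str.split? aws_trace_header ";").getD []
  let root := lastFieldB parts "Root="
  let span_id := lastFieldB parts "Parent="
  let sampled := lastFieldB parts "Sampled="
  let root_parts := (PySem.Str.split? root "-").getD []
  let trace_id := if root_parts.length > 2 then
      ((PySem.List.pyGet? root_parts 1).getD "") ++ ((PySem.List.pyGet? root_parts 2).getD "")
    else ""
  let flags := if sampled = "1" then "01" else "00"
  "00-" ++ trace_id ++ "-" ++ span_id ++ "-" ++ flags

-- ===== PRECONDITION & SPEC =====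
def Spec_convert_aws_trace_header_to_parent_trace (aws_trace_header : String) (out : String) : Prop := out = convert_aws_trace_header_to_parent_trace_alt aws_trace_header
instance (aws_trace_header : String) (out : String) : Decidable (Spec_convert_aws_trace_header_to_parent_trace aws_trace_header out) := by unfold Spec_convert_aws_trace_header_to_parent_trace; infer_instance

-- ===== CLAIM (what is proved, stated in full; the proofs are below) =====
def Claim_equal_convert_aws_trace_header_to_parent_trace : Prop := ∀ (aws_trace_header : String), Dom_convert_aws_trace_header_to_parent_trace aws_trace_header → Spec_convert_aws_trace_header_to_parent_trace aws_trace_header (convert_aws_trace_header_to_parent_trace aws_trace_header)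

-- ===== LEMMAS AND PROOFS =====

-- prefixes starting with different first characters are mutually exclusive
theorem sw_disj (x : String) (p q : String) (hp : PySem.Str.startswith x p = true)
    (hq : PySem.Str.startswith x q = true) (h : p.toList.head? ≠ q.toList.head?)
    (hn : p.toList ≠ []) (hqn : q.toList ≠ []) : False := by
  simp only [PySem.Str.startswith_eq, PySem.Chars.startswith_iff] at hp hq
  obtain ⟨t, ht⟩ := hp
  obtain ⟨u, hu⟩ := hq
  cases hP : p.toList with
  | nil => exact hn hP
  | cons a l =>
    cases hQ : q.toList with
    | nil => exact hqn hQ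
    | cons b m =>
      rw [hP] at ht; rw [hQ] at hu
      rw [← ht] at hu
      simp at hu
      rw [hP, hQ] at h
      simp [hu.1] at h

-- unfolding lastFieldB when one more part is appended: the appended part is checked first
theorem lastFieldB_append (parts : List String) (x : String) (pre : String) :
    lastFieldB (parts ++ [x]) pre =
      if PySem.Str.startswith x pre then PySem.Str.slice x (some ((PySem.Str.len pre : Int))) none
      else lastFieldB parts pre := by
  unfold lastFieldB
  rw [List.reverse_append]
  simp only [List.reverse_cons, List.reverse_nil, List.nil_append, List.singleton_append,
    List.find?_cons]
  by_cases h : PySem.Str.startswith x pre = true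
  · rw [h]; rfl
  · rw [eq_false_of_ne_true h]; rfl

-- A's three-accumulator fold computes exactly B's three right-to-left searches
theorem fold_eq_lastFields (parts : List String) :
    parts.foldl stepA ("", "", "") =
      (lastFieldB parts "Root=", lastFieldB parts "Parent=", lastFieldB parts "Sampled=") := by
  induction parts using List.reverseRecOn with
  | nil => simp [lastFieldB]
  | append_singleton l x ih =>
    rw [List.foldl_append, List.foldl_cons, List.foldl_nil, ih,
        lastFieldB_append, lastFieldB_append, lastFieldB_append]
    unfold stepA
    by_cases h1 : PySem.Str.startswith x "Root=" = true
    · have h2 : PySem.Str.startswith x "Parent=" = false := by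
        by_contra hc
        exact sw_disj x "Root=" "Parent=" h1 (by simpa using hc) (by decide) (by decide) (by decide)
      have h3 : PySem.Str.startswith x "Sampled=" = false := by
        by_contra hc
        exact sw_disj x "Root=" "Sampled=" h1 (by simpa using hc) (by decide) (by decide) (by decide)
      simp at h1 h2 h3
      simp [h1, h2, h3]
    · have h1' : PySem.Str.startswith x "Root=" = false := eq_false_of_ne_true h1
      by_cases h2 : PySem.Str.startswith x "Parent=" = true
      · have h3 : PySem.Str.startswith x "Sampled=" = false := by
          by_contra hc
          exact sw_disj x "Parent=" "Sampled=" h2 (by simpa using hc) (by decide) (by decide) (by decide)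
        simp at h1' h2 h3
        simp [h1', h2, h3]
      · have h2' : PySem.Str.startswith x "Parent=" = false := eq_false_of_ne_true h2
        by_cases h3 : PySem.Str.startswith x "Sampled=" = true
        · simp at h1' h2' h3
          simp [h1', h2', h3]
        · have h3' : PySem.Str.startswith x "Sampled=" = false := eq_false_of_ne_true h3
          simp at h1' h2' h3'
          simp [h1', h2', h3']

-- ===== VERDICT (by name: the statement is the Claim_ definition above) =====
theorem convert_aws_trace_header_to_parent_trace_spec : Claim_equal_convert_aws_trace_header_to_parent_trace := by
  intro s _
  show _ = _
  simp only [convert_aws_trace_header_to_parent_trace, convert_aws_trace_header_to_parent_trace_alt,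
    fold_eq_lastFields]
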